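-- pv_equiv track=rewrite | github.com/habla-liaa/persistent-cost | src/persistent_cost/cone2.py | kercoker_bars
-- ===== SOURCE A (Python) =====
-- def remove_empty_dims(pairs):
--     """Remove empty dimensions from a persistence diagram."""
--     return [dim for dim in pairs if len(dim) > 0]
--
-- def kercoker_bars(pairs_cone, pairs_X, pairs_Y, cone_index):
--     """
--     Find cokernel and kernel bars in the persistence diagram.
--     TODO: optimize
--     """
--
--     maxdim = len(pairs_cone) - 1
--
--     pairs_coker = [[] for _ in range(maxdim + 1)]
--     pairs_ker = [[] for _ in range(maxdim + 1)]
--     missing = [[] for _ in range(maxdim + 1)]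
--
--     for dim in range(maxdim + 1):
--         for i, pair in enumerate(pairs_cone[dim]):
--             newbar = False
--             b, d = pair
--             if len(d) == 0:
--                 continue
--             # remove cone vertex index with pop
--             b = [v for v in b if v != cone_index]
--             d = [v for v in d if v != cone_index]
--
--             # coker
--             # b_c = b_y_i
--             # d_c = d_y_i
--             for p in pairs_Y[dim]:
--                 if len(p[0]) != len(b) or len(p[1]) != len(d):
--                     continue
--                 if p[0] == b and p[1] == d:
--                     pairs_coker[dim].append((b, d))
--                     newbar = True
--
--             # b_c = b_y_i
--             # d_c = b_x_j
--             for j in range(len(pairs_X[dim])):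
--                 for i in range(len(pairs_Y[dim])):
--                     if len(pairs_Y[dim][i][0]) != len(b) or len(pairs_X[dim][j][0]) != len(d):
--                         continue
--                     if pairs_Y[dim][i][0] == b and pairs_X[dim][j][0] == d:
--                         pairs_coker[dim].append((b, d))
--                         newbar = True
--
--             # b_c = b_x_i
--             # d_c = d_y_i
--             for i in range(len(pairs_X[dim])):
--                 for j in range(len(pairs_Y[dim])):
--                     if len(pairs_X[dim][i][0]) != len(b) or len(pairs_Y[dim][j][1]) != len(d):
--                         continue
--                     if pairs_X[dim][i][0] == b and pairs_Y[dim][j][1] == d: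
--                         missing[dim].append(('bx,dy', (b, d)))
--                         newbar = True
--
--             # ker
--             if dim > 0:
--                 # b_c = b_x_i (dim-1)
--                 # d_c = d_x_i (dim-1)
--                 for p in pairs_X[dim - 1]:
--                     if len(p[0]) != len(b) or len(p[1]) != len(d):
--                         continue
--                     if p[0] == b and p[1] == d:
--                         pairs_ker[dim - 1].append((b, d))
--                         newbar = True
--
--                 # b_c = d_y_i (dim-1)
--                 # d_c = d_x_j (dim-1)
--                 for j in range(len(pairs_X[dim - 1])):
--                     for i in range(len(pairs_Y[dim - 1])):
--                         if len(pairs_Y[dim - 1][i][1]) != len(b) or len(pairs_X[dim - 1][j][1]) != len(d):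
--                             continue
--                         if pairs_Y[dim - 1][i][1] == b and pairs_X[dim - 1][j][1] == d:
--                             pairs_ker[dim - 1].append((b, d))
--                             newbar = True
--
--                 # b_c = b_y_i
--                 # d_c = d_x_j (dim-1)
--                 for i in range(len(pairs_Y[dim])):
--                     for j in range(len(pairs_X[dim - 1])):
--                         if len(pairs_Y[dim][i][0]) != len(b) or len(pairs_X[dim - 1][j][1]) != len(d):
--                             continue
--                         if pairs_Y[dim][i][0] == b and pairs_X[dim - 1][j][1] == d:
--                             missing[dim - 1].append(('by,dx(-1)', (b, d)))
--                             newbar = True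
--
--             if not newbar:
--                 missing[dim].append(('null', (b, d)))
--
--     pairs_coker = remove_empty_dims(pairs_coker)
--     pairs_ker = remove_empty_dims(pairs_ker)
--     missing = remove_empty_dims(missing)
--     return pairs_coker, pairs_ker, missing
-- ===== SOURCE B (Python) =====
-- def kercoker_bars(pairs_cone, pairs_X, pairs_Y, cone_index):
--     """Match cone bars via tuple-keyed frequency dicts instead of nested scans."""
--     n = len(pairs_cone)
--     coker = [[] for _ in range(n)]
--     ker = [[] for _ in range(n)]
--     missing = [[] for _ in range(n)]
--
--     def counts(keys):
--         c = {}
--         for k in keys: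
--             c[k] = c.get(k, 0) + 1
--         return c
--
--     for dim in range(n):
--         cone_dim = pairs_cone[dim]
--         if not any(len(p[1]) > 0 for p in cone_dim):
--             continue
--         Y = pairs_Y[dim]
--         X = pairs_X[dim]
--         y0 = counts(tuple(p[0]) for p in Y)
--         y1 = counts(tuple(p[1]) for p in Y)
--         ypair = counts((tuple(p[0]), tuple(p[1])) for p in Y)
--         x0 = counts(tuple(p[0]) for p in X)
--         if dim > 0:
--             xm1 = counts(tuple(p[1]) for p in pairs_X[dim - 1])
--             xmpair = counts((tuple(p[0]), tuple(p[1])) for p in pairs_X[dim - 1])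
--             ym1 = counts(tuple(p[1]) for p in pairs_Y[dim - 1])
--         for b0, d0 in cone_dim:
--             if len(d0) == 0:
--                 continue
--             b = [v for v in b0 if v != cone_index]
--             d = [v for v in d0 if v != cone_index]
--             tb, td = tuple(b), tuple(d)
--             matched = 0
--             k = ypair.get((tb, td), 0)
--             coker[dim] += [(b, d)] * k
--             matched += k
--             k = y0.get(tb, 0) * x0.get(td, 0)
--             coker[dim] += [(b, d)] * k
--             matched += k
--             k = x0.get(tb, 0) * y1.get(td, 0)
--             missing[dim] += [('bx,dy', (b, d))] * k
--             matched += k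
--             if dim > 0:
--                 k = xmpair.get((tb, td), 0)
--                 ker[dim - 1] += [(b, d)] * k
--                 matched += k
--                 k = ym1.get(tb, 0) * xm1.get(td, 0)
--                 ker[dim - 1] += [(b, d)] * k
--                 matched += k
--                 k = y0.get(tb, 0) * xm1.get(td, 0)
--                 missing[dim - 1] += [('by,dx(-1)', (b, d))] * k
--                 matched += k
--             if matched == 0:
--                 missing[dim].append(('null', (b, d)))
--
--     nonempty = lambda ps: [dim for dim in ps if len(dim) > 0]
--     return nonempty(coker), nonempty(ker), nonempty(missing)
-- ===== Notes on version B (the rewrite author's own statement) =====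
-- stated objective: faster
-- what changed: Replaces every nested match loop over pairs_X/pairs_Y by per-dimension frequency dictionaries built once (keyed by tuple-ized birth/death values), appending count-many copies via list repetition, so the per-bar work is O(1) dict lookups instead of scans over X and Y.
import Mathlib
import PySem

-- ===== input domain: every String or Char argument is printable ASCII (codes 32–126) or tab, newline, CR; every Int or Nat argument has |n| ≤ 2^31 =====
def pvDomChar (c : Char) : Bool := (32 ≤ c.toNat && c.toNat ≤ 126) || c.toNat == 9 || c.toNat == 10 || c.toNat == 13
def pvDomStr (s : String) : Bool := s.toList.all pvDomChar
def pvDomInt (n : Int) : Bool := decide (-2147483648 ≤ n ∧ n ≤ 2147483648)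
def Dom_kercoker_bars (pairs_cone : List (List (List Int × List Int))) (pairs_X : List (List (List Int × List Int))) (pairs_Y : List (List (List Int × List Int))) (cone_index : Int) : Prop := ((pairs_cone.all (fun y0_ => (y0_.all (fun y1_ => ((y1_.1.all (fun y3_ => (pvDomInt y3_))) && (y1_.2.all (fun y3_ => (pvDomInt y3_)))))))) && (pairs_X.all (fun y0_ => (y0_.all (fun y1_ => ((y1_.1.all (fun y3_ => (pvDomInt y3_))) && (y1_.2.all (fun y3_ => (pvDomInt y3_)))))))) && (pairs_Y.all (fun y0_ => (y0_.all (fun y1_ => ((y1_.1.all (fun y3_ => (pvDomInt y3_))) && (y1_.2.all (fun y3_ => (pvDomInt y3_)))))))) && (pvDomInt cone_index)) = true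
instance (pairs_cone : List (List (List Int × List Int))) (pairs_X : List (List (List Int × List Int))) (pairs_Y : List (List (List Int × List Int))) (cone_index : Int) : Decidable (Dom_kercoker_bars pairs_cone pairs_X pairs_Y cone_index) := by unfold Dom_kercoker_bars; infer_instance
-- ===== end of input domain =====

-- ===== PORT A =====
-- Header: B replaces A's nested match scans by per-dimension frequency dictionaries
-- (count lookups + list repetition); measured faster is whatever a timing run reports.

-- helper of A: remove_empty_dims
def remove_empty_dims {g : Type} (pairs : List (List g)) : List (List g) :=
  pairs.filter (fun dim => decide (0 < dim.length))

-- per-cone-pair body of A's main loop (literal transliteration of the phase loops)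
def pvStepA (Xd Yd Xm1 Ym1 : List (List Int × List Int)) (ci : Int) (dim : Int)
    (st : List (List (List Int × List Int)) × List (List (List Int × List Int)) × List (List (String × (List Int × List Int))))
    (pair : List Int × List Int) :
    List (List (List Int × List Int)) × List (List (List Int × List Int)) × List (List (String × (List Int × List Int))) :=
  if pair.2.length = 0 then st else
  let b := pair.1.filter (fun v => decide (v ≠ ci))
  let d := pair.2.filter (fun v => decide (v ≠ ci))
  -- coker: b_c = b_y_i, d_c = d_y_i
  match Yd.foldl (fun (s : List (List (List Int × List Int)) × Bool) p =>
      if p.1.length ≠ b.length ∨ p.2.length ≠ d.length then s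
      else if p.1 = b ∧ p.2 = d then (s.1.modify dim.toNat (· ++ [(b, d)]), true) else s)
    (st.1, false) with
  | (ck1, nb1) =>
  -- coker: b_c = b_y_i, d_c = b_x_j
  match List.foldl (fun (s : List (List (List Int × List Int)) × Bool) j =>
      List.foldl (fun (s : List (List (List Int × List Int)) × Bool) i2 =>
        if (PySem.List.pyGetD Yd i2 ([], [])).1.length ≠ b.length ∨ (PySem.List.pyGetD Xd j ([], [])).1.length ≠ d.length then s
        else if (PySem.List.pyGetD Yd i2 ([], [])).1 = b ∧ (PySem.List.pyGetD Xd j ([], [])).1 = d then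
          (s.1.modify dim.toNat (· ++ [(b, d)]), true) else s)
      s (PySem.List.pyRange 0 (Yd.length : Int)))
    (ck1, nb1) (PySem.List.pyRange 0 (Xd.length : Int)) with
  | (ck2, nb2) =>
  -- missing: b_c = b_x_i, d_c = d_y_j
  match List.foldl (fun (s : List (List (String × (List Int × List Int))) × Bool) i2 =>
      List.foldl (fun (s : List (List (String × (List Int × List Int))) × Bool) j =>
        if (PySem.List.pyGetD Xd i2 ([], [])).1.length ≠ b.length ∨ (PySem.List.pyGetD Yd j ([], [])).2.length ≠ d.length then s
        else if (PySem.List.pyGetD Xd i2 ([], [])).1 = b ∧ (PySem.List.pyGetD Yd j ([], [])).2 = d then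
          (s.1.modify dim.toNat (· ++ [("bx,dy", (b, d))]), true) else s)
      s (PySem.List.pyRange 0 (Yd.length : Int)))
    (st.2.2, nb2) (PySem.List.pyRange 0 (Xd.length : Int)) with
  | (ms1, nb3) =>
  -- ker (only for dim > 0)
  match (if (0 : Int) < dim then
      match Xm1.foldl (fun (s : List (List (List Int × List Int)) × Bool) p =>
          if p.1.length ≠ b.length ∨ p.2.length ≠ d.length then s
          else if p.1 = b ∧ p.2 = d then (s.1.modify (dim - 1).toNat (· ++ [(b, d)]), true) else s)
        (st.2.1, nb3) with
      | (kr1, nb4) =>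
      match List.foldl (fun (s : List (List (List Int × List Int)) × Bool) j =>
          List.foldl (fun (s : List (List (List Int × List Int)) × Bool) i2 =>
            if (PySem.List.pyGetD Ym1 i2 ([], [])).2.length ≠ b.length ∨ (PySem.List.pyGetD Xm1 j ([], [])).2.length ≠ d.length then s
            else if (PySem.List.pyGetD Ym1 i2 ([], [])).2 = b ∧ (PySem.List.pyGetD Xm1 j ([], [])).2 = d then
              (s.1.modify (dim - 1).toNat (· ++ [(b, d)]), true) else s)
          s (PySem.List.pyRange 0 (Ym1.length : Int)))
        (kr1, nb4) (PySem.List.pyRange 0 (Xm1.length : Int)) with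
      | (kr2, nb5) =>
      match List.foldl (fun (s : List (List (String × (List Int × List Int))) × Bool) i2 =>
          List.foldl (fun (s : List (List (String × (List Int × List Int))) × Bool) j =>
            if (PySem.List.pyGetD Yd i2 ([], [])).1.length ≠ b.length ∨ (PySem.List.pyGetD Xm1 j ([], [])).2.length ≠ d.length then s
            else if (PySem.List.pyGetD Yd i2 ([], [])).1 = b ∧ (PySem.List.pyGetD Xm1 j ([], [])).2 = d then
              (s.1.modify (dim - 1).toNat (· ++ [("by,dx(-1)", (b, d))]), true) else s)
          s (PySem.List.pyRange 0 (Xm1.length : Int)))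
        (ms1, nb5) (PySem.List.pyRange 0 (Yd.length : Int)) with
      | (ms2, nb6) => (kr2, ms2, nb6)
    else (st.2.1, ms1, nb3)) with
  | (kr, ms2, nb6) =>
  let ms := if nb6 = false then ms2.modify dim.toNat (· ++ [("null", (b, d))]) else ms2
  (ck2, kr, ms)

-- one iteration of A's 'for dim in range(maxdim + 1)' loop
def pvDimA (pairs_cone pairs_X pairs_Y : List (List (List Int × List Int))) (ci : Int)
    (st : List (List (List Int × List Int)) × List (List (List Int × List Int)) × List (List (String × (List Int × List Int))))
    (dim : Int) :
    List (List (List Int × List Int)) × List (List (List Int × List Int)) × List (List (String × (List Int × List Int))) :=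
  (PySem.List.pyGetD pairs_cone dim []).foldl
    (pvStepA (PySem.List.pyGetD pairs_X dim []) (PySem.List.pyGetD pairs_Y dim [])
             (PySem.List.pyGetD pairs_X (dim - 1) []) (PySem.List.pyGetD pairs_Y (dim - 1) []) ci dim) st

def kercoker_bars (pairs_cone : List (List (List Int × List Int))) (pairs_X : List (List (List Int × List Int))) (pairs_Y : List (List (List Int × List Int))) (cone_index : Int) : (List (List (List Int × List Int))) × (List (List (List Int × List Int))) × (List (List (String × (List Int × List Int)))) :=
  let maxdim : Int := (pairs_cone.length : Int) - 1
  let init := (List.replicate (maxdim + 1).toNat ([] : List (List Int × List Int)),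
               List.replicate (maxdim + 1).toNat ([] : List (List Int × List Int)),
               List.replicate (maxdim + 1).toNat ([] : List (String × (List Int × List Int))))
  let r := (PySem.List.pyRange 0 (maxdim + 1)).foldl (pvDimA pairs_cone pairs_X pairs_Y cone_index) init
  (remove_empty_dims r.1, remove_empty_dims r.2.1, remove_empty_dims r.2.2)

-- ===== PORT B =====
-- one iteration of B's dim loop: frequency dictionaries once, count lookups per cone bar
def pvDimB (pairs_cone pairs_X pairs_Y : List (List (List Int × List Int))) (ci : Int)
    (st : List (List (List Int × List Int)) × List (List (List Int × List Int)) × List (List (String × (List Int × List Int))))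
    (dim : Nat) :
    List (List (List Int × List Int)) × List (List (List Int × List Int)) × List (List (String × (List Int × List Int))) :=
  let cone_dim := pairs_cone.getD dim []
  if (cone_dim.any fun p => decide (0 < p.2.length)) = false then st else
  let Yd := pairs_Y.getD dim []
  let Xd := pairs_X.getD dim []
  let y0 := PySem.Dict.counter (Yd.map (fun p => p.1))
  let y1 := PySem.Dict.counter (Yd.map (fun p => p.2))
  let ypair := PySem.Dict.counter Yd
  let x0 := PySem.Dict.counter (Xd.map (fun p => p.1))
  let xm1 := PySem.Dict.counter ((pairs_X.getD (dim - 1) []).map (fun p => p.2))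
  let xmpair := PySem.Dict.counter (pairs_X.getD (dim - 1) [])
  let ym1 := PySem.Dict.counter ((pairs_Y.getD (dim - 1) []).map (fun p => p.2))
  cone_dim.foldl (fun st pair =>
    if pair.2.length = 0 then st else
    let b := pair.1.filter (fun v => decide (v ≠ ci))
    let d := pair.2.filter (fun v => decide (v ≠ ci))
    let k1 := ypair.getD (b, d) 0
    let k2 := y0.getD b 0 * x0.getD d 0
    let k3 := x0.getD b 0 * y1.getD d 0
    let coker2 := (st.1.modify dim (· ++ List.replicate k1.toNat (b, d))).modify dim (· ++ List.replicate k2.toNat (b, d))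
    let miss1 := st.2.2.modify dim (· ++ List.replicate k3.toNat ("bx,dy", (b, d)))
    match (if 0 < dim then
        let k4 := xmpair.getD (b, d) 0
        let k5 := ym1.getD b 0 * xm1.getD d 0
        let k6 := y0.getD b 0 * xm1.getD d 0
        ((st.2.1.modify (dim - 1) (· ++ List.replicate k4.toNat (b, d))).modify (dim - 1) (· ++ List.replicate k5.toNat (b, d)),
         miss1.modify (dim - 1) (· ++ List.replicate k6.toNat ("by,dx(-1)", (b, d))),
         k1 + k2 + k3 + k4 + k5 + k6)
      else (st.2.1, miss1, k1 + k2 + k3)) with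
    | (kr, ms2, matched) =>
    let miss3 := if matched = 0 then ms2.modify dim (· ++ [("null", (b, d))]) else ms2
    (coker2, kr, miss3)) st

def kercoker_bars_alt (pairs_cone : List (List (List Int × List Int))) (pairs_X : List (List (List Int × List Int))) (pairs_Y : List (List (List Int × List Int))) (cone_index : Int) : (List (List (List Int × List Int))) × (List (List (List Int × List Int))) × (List (List (String × (List Int × List Int)))) :=
  let n := pairs_cone.length
  let init := (List.replicate n ([] : List (List Int × List Int)),
               List.replicate n ([] : List (List Int × List Int)),
               List.replicate n ([] : List (String × (List Int × List Int))))
  let r := (List.range n).foldl (pvDimB pairs_cone pairs_X pairs_Y cone_index) init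
  (r.1.filter (fun l => decide (0 < l.length)),
   r.2.1.filter (fun l => decide (0 < l.length)),
   r.2.2.filter (fun l => decide (0 < l.length)))

-- ===== PRECONDITION & SPEC =====
-- Pre_ excludes exactly the inputs where Python A raises IndexError: a dimension whose cone
-- diagram contains a bar with nonempty death needs pairs_X/pairs_Y to reach that dimension.
def Pre_kercoker_bars (pairs_cone : List (List (List Int × List Int))) (pairs_X : List (List (List Int × List Int))) (pairs_Y : List (List (List Int × List Int))) (cone_index : Int) : Prop :=
  ∀ dim ∈ List.range pairs_cone.length,
    ((pairs_cone.getD dim []).any fun p => decide (0 < p.2.length)) = true →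
      dim < pairs_X.length ∧ dim < pairs_Y.length
instance (pairs_cone : List (List (List Int × List Int))) (pairs_X : List (List (List Int × List Int))) (pairs_Y : List (List (List Int × List Int))) (cone_index : Int) : Decidable (Pre_kercoker_bars pairs_cone pairs_X pairs_Y cone_index) := by unfold Pre_kercoker_bars; infer_instance

def pvWitness_kercoker_bars : (List (List (List Int × List Int))) × (List (List (List Int × List Int))) × (List (List (List Int × List Int))) × Int :=
  ([[([1], [2]), ([], [3])]], [[([1], [2])]], [[([1], [3]), ([2], [2])]], 0)

def Spec_kercoker_bars (pairs_cone : List (List (List Int × List Int))) (pairs_X : List (List (List Int × List Int))) (pairs_Y : List (List (List Int × List Int))) (cone_index : Int) (out : (List (List (List Int × List Int))) × (List (List (List Int × List Int))) × (List (List (String × (List Int × List Int))))) : Prop := out = kercoker_bars_alt pairs_cone pairs_X pairs_Y cone_index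
instance (pairs_cone : List (List (List Int × List Int))) (pairs_X : List (List (List Int × List Int))) (pairs_Y : List (List (List Int × List Int))) (cone_index : Int) (out : (List (List (List Int × List Int))) × (List (List (List Int × List Int))) × (List (List (String × (List Int × List Int))))) : Decidable (Spec_kercoker_bars pairs_cone pairs_X pairs_Y cone_index out) := by unfold Spec_kercoker_bars; exact @instDecidableEqProd _ _ inferInstance (@instDecidableEqProd _ _ inferInstance inferInstance) _ _

-- ===== CLAIM (what is proved, stated in full; the proofs are below) =====
def Claim_equal_kercoker_bars : Prop := ∀ (pairs_cone : List (List (List Int × List Int))) (pairs_X : List (List (List Int × List Int))) (pairs_Y : List (List (List Int × List Int))) (cone_index : Int), Dom_kercoker_bars pairs_cone pairs_X pairs_Y cone_index → Pre_kercoker_bars pairs_cone pairs_X pairs_Y cone_index → Spec_kercoker_bars pairs_cone pairs_X pairs_Y cone_index (kercoker_bars pairs_cone pairs_X pairs_Y cone_index)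

-- ===== LEMMAS AND PROOFS =====

theorem pv_modify_modify {a : Type} (l : List a) (i : Nat) (f g : a → a) :
    (l.modify i f).modify i g = l.modify i (fun x => g (f x)) := by
  induction l generalizing i with
  | nil => simp
  | cons h t ih => cases i <;> simp [ih]
theorem pv_modify_id {a : Type} (l : List a) (i : Nat) (f : a → a) (hf : ∀ x, f x = x) :
    l.modify i f = l := by
  induction l generalizing i with
  | nil => simp
  | cons h t ih => cases i <;> simp [ih, hf]
theorem pv_foldl_phase {a g : Type} (l : List a) (C : a → Prop) [DecidablePred C]
    (i : Nat) (x : g) (st : List (List g)) (nb : Bool) :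
    l.foldl (fun (s : List (List g) × Bool) p =>
      if C p then (s.1.modify i (· ++ [x]), true) else s) (st, nb)
    = (st.modify i (· ++ List.replicate (l.countP (fun p => decide (C p))) x),
       nb || l.any (fun p => decide (C p))) := by
  induction l generalizing st nb with
  | nil => simp [pv_modify_id]
  | cons h t ih =>
    by_cases hc : C h
    · rw [List.foldl_cons]
      simp only [hc, if_true]
      rw [ih, pv_modify_modify]
      simp [hc, List.replicate_succ, List.append_assoc]
    · rw [List.foldl_cons]
      simp only [hc, if_false]
      rw [ih]
      simp [hc]
theorem pv_single_phase {a g : Type} (l : List a) (L E : a → Prop)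
    [DecidablePred L] [DecidablePred E] (hLE : ∀ p, E p → ¬ L p)
    (i : Nat) (x : g) (st : List (List g)) (nb : Bool) :
    l.foldl (fun (s : List (List g) × Bool) p =>
      if L p then s else if E p then (s.1.modify i (· ++ [x]), true) else s) (st, nb)
    = (st.modify i (· ++ List.replicate (l.countP (fun p => decide (E p))) x),
       nb || l.any (fun p => decide (E p))) := by
  rw [PySem.List.foldl_congr_mem _ _
      (fun (s : List (List g) × Bool) p => if E p then (s.1.modify i (· ++ [x]), true) else s) _
      (by
        intro acc p _
        by_cases hE : E p
        · rw [if_neg (hLE p hE)]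
        · simp [hE])]
  exact pv_foldl_phase l E i x st nb
theorem pv_double_phase {a g : Type} (l1 l2 : List a) (dd : a)
    (L E : a → a → Prop) [∀ p q, Decidable (L p q)] [∀ p q, Decidable (E p q)]
    (Q R : a → Prop) [DecidablePred Q] [DecidablePred R]
    (hLE : ∀ p q, E p q → ¬ L p q) (hE : ∀ p q, E p q ↔ (Q p ∧ R q))
    (i : Nat) (x : g) (st : List (List g)) (nb : Bool) :
    List.foldl (fun (s : List (List g) × Bool) j =>
      List.foldl (fun (s : List (List g) × Bool) k =>
        if L (PySem.List.pyGetD l1 j dd) (PySem.List.pyGetD l2 k dd) then s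
        else if E (PySem.List.pyGetD l1 j dd) (PySem.List.pyGetD l2 k dd) then
          (s.1.modify i (· ++ [x]), true) else s)
      s (PySem.List.pyRange 0 (l2.length : Int)))
    (st, nb) (PySem.List.pyRange 0 (l1.length : Int))
    = (st.modify i (· ++ List.replicate ((l1.countP fun p => decide (Q p)) * (l2.countP fun p => decide (R p))) x),
       nb || ((l1.any fun p => decide (Q p)) && (l2.any fun p => decide (R p)))) := by
  rw [PySem.List.foldl_pyRange_zero_pyGetD' l1 dd
      (f := fun (s : List (List g) × Bool) p =>
        List.foldl (fun (s : List (List g) × Bool) k =>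
          if L p (PySem.List.pyGetD l2 k dd) then s
          else if E p (PySem.List.pyGetD l2 k dd) then (s.1.modify i (· ++ [x]), true) else s)
        s (PySem.List.pyRange 0 (l2.length : Int)))]
  induction l1 generalizing st nb with
  | nil => simp [pv_modify_id]
  | cons p1 t ih =>
    rw [List.foldl_cons]
    rw [PySem.List.foldl_pyRange_zero_pyGetD' l2 dd
        (f := fun (s : List (List g) × Bool) q =>
          if L p1 q then s else if E p1 q then (s.1.modify i (· ++ [x]), true) else s)]
    rw [pv_single_phase l2 (L p1) (E p1) (hLE p1) i x st nb]
    by_cases hq : Q p1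
    · rw [List.countP_congr (by intro q _; simp [hE, hq] :
            ∀ q ∈ l2, (decide (E p1 q) = true ↔ decide (R q) = true)),
          List.any_congr rfl (q := fun q => decide (R q)) (by intro q; simp [hE, hq])]
      rw [ih, pv_modify_modify]
      have harith : l2.countP (fun q => decide (R q)) + (t.countP fun p => decide (Q p)) * (l2.countP fun q => decide (R q))
          = ((t.countP fun p => decide (Q p)) + 1) * (l2.countP fun q => decide (R q)) := by ring
      simp only [List.countP_cons, List.any_cons, hq, decide_true, Bool.true_or, Bool.true_and,
        List.append_assoc, ← List.replicate_add, harith, Prod.mk.injEq]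
      constructor
      · rfl
      · cases nb <;> cases (l2.any fun q => decide (R q)) <;>
          cases (t.any fun p => decide (Q p)) <;> simp
    · have h0 : l2.countP (fun q => decide (E p1 q)) = 0 :=
        List.countP_eq_zero.mpr (by intro q _; simp [hE, hq])
      have h1 : (l2.any fun q => decide (E p1 q)) = false := by
        simp only [List.any_eq_false]; intro q _; simp [hE, hq]
      rw [h0, h1, pv_modify_id _ _ _ (by intro z; simp)]
      rw [ih]
      simp only [List.countP_cons, List.any_cons, hq, decide_false, Bool.false_or, Bool.or_false,
        Nat.add_zero, Bool.false_and]
      constructor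

theorem pv_count_pair (l : List (List Int × List Int)) (b d : List Int) :
    List.count (b, d) l = l.countP (fun p => decide (p.1 = b ∧ p.2 = d)) := by
  rw [List.count_eq_countP]
  exact List.countP_congr (by intro p _; constructor <;> (intro h; simp_all [Prod.ext_iff]))
theorem pv_count_fst (l : List (List Int × List Int)) (v : List Int) :
    List.count v (l.map (fun p => p.1)) = l.countP (fun p => decide (p.1 = v)) := by
  rw [List.count_eq_countP, List.countP_map]
  exact List.countP_congr (by intro p _; simp only [Function.comp, beq_iff_eq, decide_eq_true_eq])
theorem pv_count_snd (l : List (List Int × List Int)) (v : List Int) :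
    List.count v (l.map (fun p => p.2)) = l.countP (fun p => decide (p.2 = v)) := by
  rw [List.count_eq_countP, List.countP_map]
  exact List.countP_congr (by intro p _; simp only [Function.comp, beq_iff_eq, decide_eq_true_eq])
theorem pv_toNat_cast (m : Nat) : ((m : Int)).toNat = m := Int.toNat_natCast m
theorem pv_toNat_mul (m n : Nat) : ((m : Int) * (n : Int)).toNat = m * n := by
  rw [← Nat.cast_mul, Int.toNat_natCast]
theorem pv_any_false {a : Type} (l : List a) (p : a → Bool) :
    (l.any p = false) ↔ l.countP p = 0 := by
  rw [List.countP_eq_zero, List.any_eq_false]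
theorem pv_sum3 (n1 n2 n3 : Nat) : ((n1:Int) + n2 + n3 = 0) ↔ (n1 = 0 ∧ n2 = 0 ∧ n3 = 0) := by omega
theorem pv_sum6 (n1 n2 n3 n4 n5 n6 : Nat) :
    ((n1:Int) + n2 + n3 + n4 + n5 + n6 = 0) ↔ (n1 = 0 ∧ n2 = 0 ∧ n3 = 0 ∧ n4 = 0 ∧ n5 = 0 ∧ n6 = 0) := by omega


theorem pv_prodcast (a b : Nat) : ((a:Int) * (b:Int)) = ((a*b : Nat) : Int) := by push_cast; ring
theorem pv_dim_eq (pc px py : List (List (List Int × List Int))) (ci : Int) (k : Nat)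
    (st : List (List (List Int × List Int)) × List (List (List Int × List Int)) × List (List (String × (List Int × List Int)))) :
    pvDimA pc px py ci st (k : Int) = pvDimB pc px py ci st k := by
  have hpc : PySem.List.pyGetD pc (k : Int) [] = pc.getD k [] := PySem.List.pyGetD_natCast pc k []
  have hpx : PySem.List.pyGetD px (k : Int) [] = px.getD k [] := PySem.List.pyGetD_natCast px k []
  have hpy : PySem.List.pyGetD py (k : Int) [] = py.getD k [] := PySem.List.pyGetD_natCast py k []
  by_cases hAny : ((pc.getD k []).any fun p => decide (0 < p.2.length)) = false
  · simp only [pvDimA, pvDimB, hpc, hAny, if_true, if_pos rfl]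
    rw [PySem.List.foldl_congr_mem _ _ (fun acc _ => acc) _ ?_]
    · exact PySem.List.foldl_ignore _ _
    · intro acc p hp
      have : p.2.length = 0 := by
        rcases List.any_eq_false.mp hAny p hp with h
        simpa using h
      simp [pvStepA, this]
  · simp only [pvDimB]
    rw [if_neg hAny]
    simp only [pvDimA, hpc, hpx, hpy]
    refine PySem.List.foldl_congr_mem _ _ _ _ ?_
    intro acc p _
    by_cases hlen : p.2.length = 0
    · simp [pvStepA, hlen]
    · rcases k with _ | j
      · simp only [pvStepA, if_neg hlen]
        rw [if_neg (by simp : ¬ (0:Int) < ((0:Nat) : Int))]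
        generalize (List.filter (fun v => decide (v ≠ ci)) p.1) = b
        generalize (List.filter (fun v => decide (v ≠ ci)) p.2) = d
        generalize hYd : py.getD 0 [] = Yd
        generalize hXd : px.getD 0 [] = Xd
        rw [pv_single_phase Yd _ _
          (by rintro q ⟨h1, h2⟩; simp [h1, h2] :
            ∀ q : List Int × List Int, (q.1 = b ∧ q.2 = d) → ¬(q.1.length ≠ b.length ∨ q.2.length ≠ d.length))]
        rw [pv_double_phase Xd Yd ([], [])
          (fun p1 p2 => p2.1.length ≠ b.length ∨ p1.1.length ≠ d.length)
          (fun p1 p2 => p2.1 = b ∧ p1.1 = d)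
          (fun p1 => p1.1 = d) (fun p2 => p2.1 = b)
          (by rintro p1 p2 ⟨h1, h2⟩; simp [h1, h2]) (by intro p1 p2; exact and_comm)]
        rw [pv_double_phase Xd Yd ([], [])
          (fun p1 p2 => p1.1.length ≠ b.length ∨ p2.2.length ≠ d.length)
          (fun p1 p2 => p1.1 = b ∧ p2.2 = d)
          (fun p1 => p1.1 = b) (fun p2 => p2.2 = d)
          (by rintro p1 p2 ⟨h1, h2⟩; simp [h1, h2]) (by intro p1 p2; exact Iff.rfl)]
        simp only [PySem.Dict.getD_counter, pv_count_pair, pv_count_fst, pv_count_snd,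
          pv_toNat_mul, pv_toNat_cast, Bool.false_or, Nat.lt_irrefl, if_false]
        rw [Nat.mul_comm (List.countP (fun p => decide (p.1 = d)) Xd)
              (List.countP (fun p => decide (p.1 = b)) Yd)]
        refine congrArg₂ Prod.mk rfl ?_
        refine congrArg₂ Prod.mk rfl ?_
        refine if_congr ?_ rfl rfl
        simp only [Bool.or_eq_false_iff, Bool.and_eq_false_iff, pv_any_false, pv_prodcast,
          pv_sum3, Nat.mul_eq_zero]
        tauto
      · have hsub : ((j+1 : Nat) : Int) - 1 = ((j : Nat) : Int) := by push_cast; ring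
        have hxm : PySem.List.pyGetD px (((j+1 : Nat) : Int) - 1) [] = px.getD j [] := by
          rw [hsub]; exact PySem.List.pyGetD_natCast px j []
        have hym : PySem.List.pyGetD py (((j+1 : Nat) : Int) - 1) [] = py.getD j [] := by
          rw [hsub]; exact PySem.List.pyGetD_natCast py j []
        simp only [pvStepA, if_neg hlen, hxm, hym]
        generalize (List.filter (fun v => decide (v ≠ ci)) p.1) = b
        generalize (List.filter (fun v => decide (v ≠ ci)) p.2) = d
        generalize hYd : py.getD (j+1) [] = Yd
        generalize hXd : px.getD (j+1) [] = Xd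
        generalize hXm : px.getD ((j+1) - 1) [] = Xm
        generalize hYm : py.getD ((j+1) - 1) [] = Ym
        rw [Nat.add_sub_cancel] at hXm hYm
        rw [hXm, hYm]
        rw [pv_single_phase Yd _ _
          (by rintro q ⟨h1, h2⟩; simp [h1, h2] :
            ∀ q : List Int × List Int, (q.1 = b ∧ q.2 = d) → ¬(q.1.length ≠ b.length ∨ q.2.length ≠ d.length))]
        rw [pv_double_phase Xd Yd ([], [])
          (fun p1 p2 => p2.1.length ≠ b.length ∨ p1.1.length ≠ d.length)
          (fun p1 p2 => p2.1 = b ∧ p1.1 = d)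
          (fun p1 => p1.1 = d) (fun p2 => p2.1 = b)
          (by rintro p1 p2 ⟨h1, h2⟩; simp [h1, h2]) (by intro p1 p2; exact and_comm)]
        rw [pv_double_phase Xd Yd ([], [])
          (fun p1 p2 => p1.1.length ≠ b.length ∨ p2.2.length ≠ d.length)
          (fun p1 p2 => p1.1 = b ∧ p2.2 = d)
          (fun p1 => p1.1 = b) (fun p2 => p2.2 = d)
          (by rintro p1 p2 ⟨h1, h2⟩; simp [h1, h2]) (by intro p1 p2; exact Iff.rfl)]
        rw [if_pos (by positivity : (0:Int) < ((j+1 : Nat) : Int))]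
        rw [pv_single_phase Xm _ _
          (by rintro q ⟨h1, h2⟩; simp [h1, h2] :
            ∀ q : List Int × List Int, (q.1 = b ∧ q.2 = d) → ¬(q.1.length ≠ b.length ∨ q.2.length ≠ d.length))]
        rw [pv_double_phase Xm Ym ([], [])
          (fun p1 p2 => p2.2.length ≠ b.length ∨ p1.2.length ≠ d.length)
          (fun p1 p2 => p2.2 = b ∧ p1.2 = d)
          (fun p1 => p1.2 = d) (fun p2 => p2.2 = b)
          (by rintro p1 p2 ⟨h1, h2⟩; simp [h1, h2]) (by intro p1 p2; exact and_comm)]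
        rw [pv_double_phase Yd Xm ([], [])
          (fun p1 p2 => p1.1.length ≠ b.length ∨ p2.2.length ≠ d.length)
          (fun p1 p2 => p1.1 = b ∧ p2.2 = d)
          (fun p1 => p1.1 = b) (fun p2 => p2.2 = d)
          (by rintro p1 p2 ⟨h1, h2⟩; simp [h1, h2]) (by intro p1 p2; exact Iff.rfl)]
        simp only [PySem.Dict.getD_counter, pv_count_pair, pv_count_fst, pv_count_snd,
          pv_toNat_mul, pv_toNat_cast, Int.toNat_natCast, hsub, Nat.succ_pos, if_pos,
          Nat.add_sub_cancel, Bool.false_or]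
        rw [Nat.mul_comm (List.countP (fun p => decide (p.1 = d)) Xd)
              (List.countP (fun p => decide (p.1 = b)) Yd)]
        rw [Nat.mul_comm (List.countP (fun p => decide (p.2 = d)) Xm)
              (List.countP (fun p => decide (p.2 = b)) Ym)]
        refine congrArg₂ Prod.mk rfl ?_
        refine congrArg₂ Prod.mk rfl ?_
        refine if_congr ?_ rfl rfl
        simp only [Bool.or_eq_false_iff, Bool.and_eq_false_iff, pv_any_false, pv_prodcast,
          pv_sum6, Nat.mul_eq_zero]
        tauto

-- ===== VERDICT (by name: the statement is the Claim_ definition above) =====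
theorem kercoker_bars_spec : Claim_equal_kercoker_bars := by
  intro pc px py ci _ _
  show kercoker_bars pc px py ci = kercoker_bars_alt pc px py ci
  simp only [kercoker_bars, kercoker_bars_alt, remove_empty_dims]
  rw [show ((pc.length : Int) - 1) + 1 = (pc.length : Int) from by ring]
  rw [PySem.List.pyRange_zero_natCast pc.length]
  rw [List.foldl_map]
  rw [Int.toNat_natCast]
  rw [PySem.List.foldl_congr_mem _ _ (pvDimB pc px py ci) _
      (by intro acc k _; exact pv_dim_eq pc px py ci k acc)]
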